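-- pv_equiv track=rewrite | github.com/cocoindex-io/cocoindex-code | src/cocoindex_code/builtin_chunkers/smart_py_chunker.py | _paren_balance
-- ===== SOURCE A (Python) =====
-- def _paren_balance(line: str) -> int:
--     """Net paren depth change ignoring quoted strings.
--
--     Used to fold multi-line decorators like `@dataclass(\\n  frozen=True,\\n)`
--     back into the def boundary. A strict tokenizer would be overkill; decorators
--     rarely embed brackets in strings, so a simple scan is enough.
--     """
--     depth = 0
--     in_str: str | None = None
--     escape = False
--     for ch in line:
--         if escape:
--             escape = False
--             continue
--         if in_str is not None:
--             if ch == "\\":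
--                 escape = True
--             elif ch == in_str:
--                 in_str = None
--             continue
--         if ch in ("'", '"'):
--             in_str = ch
--             continue
--         if ch == "#":
--             break
--         if ch in "([{":
--             depth += 1
--         elif ch in ")]}":
--             depth -= 1
--     return depth
-- ===== SOURCE B (Python) =====
-- def _skip_string(line, quote, i):
--     """Return the index just past the string literal opened by `quote` at i-1.
--
--     A backslash consumes the following character; an unterminated literal
--     swallows the rest of the line.
--     """
--     n = len(line)
--     while i < n:
--         ch = line[i]
--         if ch == "\\":
--             i += 2
--         elif ch == quote:
--             return i + 1
--         else:
--             i += 1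
--     return i
--
--
-- def _paren_balance(line: str) -> int:
--     depth = 0
--     i = 0
--     n = len(line)
--     while i < n:
--         ch = line[i]
--         if ch in "'\"":
--             i = _skip_string(line, ch, i + 1)
--         elif ch == "#":
--             break
--         else:
--             if ch in "([{":
--                 depth += 1
--             elif ch in ")]}":
--                 depth -= 1
--             i += 1
--     return depth
-- ===== Notes on version B (the rewrite author's own statement) =====
-- stated objective: alternative
-- what changed: Replaces A's per-character state machine (in_str/escape flags threaded through one loop) with a tokenizing scan: the main loop sees only code characters and a helper consumes an entire string literal at once, so no string/escape state exists in the main loop.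
import Mathlib
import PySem

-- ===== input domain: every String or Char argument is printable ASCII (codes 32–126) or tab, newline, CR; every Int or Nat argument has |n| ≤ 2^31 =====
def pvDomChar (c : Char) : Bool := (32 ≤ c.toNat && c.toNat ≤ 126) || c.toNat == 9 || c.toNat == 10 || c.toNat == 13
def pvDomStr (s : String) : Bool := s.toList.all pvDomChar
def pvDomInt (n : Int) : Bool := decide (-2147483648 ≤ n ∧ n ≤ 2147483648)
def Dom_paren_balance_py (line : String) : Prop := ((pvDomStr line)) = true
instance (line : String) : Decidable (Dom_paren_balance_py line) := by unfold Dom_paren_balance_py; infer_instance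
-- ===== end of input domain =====

-- B replaces A's in_str/escape state machine with a tokenizing scan whose helper
-- consumes whole string literals; objective: alternative (same cost, different structure).


-- ===== PORT A =====
-- literal transliteration of A's for-loop with state (depth, in_str, escape)
def pvLoopA : List Char → Int → Option Char → Bool → Int
  | [], depth, _, _ => depth
  | ch :: rest, depth, inStr, escape =>
    if escape then pvLoopA rest depth inStr false
    else match inStr with
      | some q =>
        if ch = '\\' then pvLoopA rest depth (some q) true
        else if ch = q then pvLoopA rest depth none false
        else pvLoopA rest depth (some q) false
      | none =>
        if ch = '\'' ∨ ch = '"' then pvLoopA rest depth (some ch) false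
        else if ch = '#' then depth
        else if ch = '(' ∨ ch = '[' ∨ ch = '{' then pvLoopA rest (depth + 1) none false
        else if ch = ')' ∨ ch = ']' ∨ ch = '}' then pvLoopA rest (depth - 1) none false
        else pvLoopA rest depth none false

def paren_balance_py (line : String) : Int :=
  pvLoopA line.toList 0 none false

-- ===== PORT B =====
-- helper _skip_string: consume a whole string literal (backslash eats the next char)
def pvSkipStr (q : Char) : List Char → List Char
  | [] => []
  | ch :: rest =>
    if ch = '\\' then
      match rest with
      | [] => []
      | _ :: rest' => pvSkipStr q rest'
    else if ch = q then rest
    else pvSkipStr q rest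

theorem pvSkipStr_bs_nil (q : Char) : pvSkipStr q ['\\'] = [] := by
  simp [pvSkipStr]

theorem pvSkipStr_bs (q x : Char) (rest : List Char) :
    pvSkipStr q ('\\' :: x :: rest) = pvSkipStr q rest := by
  simp [pvSkipStr]

theorem pvSkipStr_close (q : Char) (rest : List Char) (h : ¬ q = '\\') :
    pvSkipStr q (q :: rest) = rest := by
  rw [pvSkipStr.eq_def]; simp [h]

theorem pvSkipStr_other (q ch : Char) (rest : List Char) (hb : ¬ ch = '\\') (hq : ¬ ch = q) :
    pvSkipStr q (ch :: rest) = pvSkipStr q rest := by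
  rw [pvSkipStr.eq_def]; simp [hb, hq]

theorem pvSkipStr_len_le_aux (q : Char) (n : Nat) :
    ∀ cs : List Char, cs.length = n → (pvSkipStr q cs).length ≤ n := by
  induction n using Nat.strong_induction_on with
  | _ n ih =>
    intro cs hlen
    subst hlen
    match cs with
    | [] => simp [pvSkipStr]
    | ch :: rest =>
      by_cases hb : ch = '\\'
      · subst hb
        match rest with
        | [] => simp [pvSkipStr_bs_nil]
        | x :: rest' =>
          have hx := ih rest'.length (by simp only [List.length_cons]; omega) rest' rfl
          rw [pvSkipStr_bs]
          simp only [List.length_cons]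
          omega
      · by_cases hq : ch = q
        · subst hq
          rw [pvSkipStr_close ch rest hb]
          simp only [List.length_cons]
          omega
        · have hr := ih rest.length (by simp only [List.length_cons]; omega) rest rfl
          rw [pvSkipStr_other q ch rest hb hq]
          simp only [List.length_cons]
          omega

theorem pvSkipStr_len_le (q : Char) (cs : List Char) : (pvSkipStr q cs).length ≤ cs.length :=
  pvSkipStr_len_le_aux q cs.length cs rfl

-- main loop of B: only code characters are seen here
def pvLoopB : List Char → Int → Int
  | [], depth => depth
  | ch :: rest, depth =>
    if ch = '\'' ∨ ch = '"' then pvLoopB (pvSkipStr ch rest) depth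
    else if ch = '#' then depth
    else if ch = '(' ∨ ch = '[' ∨ ch = '{' then pvLoopB rest (depth + 1)
    else if ch = ')' ∨ ch = ']' ∨ ch = '}' then pvLoopB rest (depth - 1)
    else pvLoopB rest depth
termination_by cs _ => cs.length
decreasing_by
  · exact Nat.lt_succ_of_le (pvSkipStr_len_le _ _)
  all_goals simp

def paren_balance_py_alt (line : String) : Int :=
  pvLoopB line.toList 0

-- ===== PRECONDITION & SPEC =====
def Spec_paren_balance_py (line : String) (out : Int) : Prop := out = paren_balance_py_alt line
instance (line : String) (out : Int) : Decidable (Spec_paren_balance_py line out) := by unfold Spec_paren_balance_py; infer_instance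

-- ===== CLAIM (what is proved, stated in full; the proofs are below) =====
def Claim_equal_paren_balance_py : Prop := ∀ (line : String), Dom_paren_balance_py line → Spec_paren_balance_py line (paren_balance_py line)

-- ===== LEMMAS AND PROOFS =====
-- combined invariant: outside a string A's loop equals B's loop; inside a string
-- (escape clear) A's loop equals B's loop run on the tail past the literal
theorem pvLoop_eq (n : Nat) : ∀ cs : List Char, cs.length = n →
    (∀ d : Int, pvLoopA cs d none false = pvLoopB cs d) ∧
    (∀ (q : Char) (d : Int), pvLoopA cs d (some q) false = pvLoopB (pvSkipStr q cs) d) := by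
  induction n using Nat.strong_induction_on with
  | _ n ih =>
    intro cs hlen
    subst hlen
    cases cs with
    | nil => simp [pvLoopA, pvLoopB, pvSkipStr]
    | cons ch rest =>
      have ihr := ih rest.length (by simp only [List.length_cons]; omega) rest rfl
      constructor
      · intro d
        by_cases hq : ch = '\'' ∨ ch = '"'
        · simp [pvLoopA, pvLoopB, hq, ihr.2 ch d]
        · by_cases h1 : ch = '#'
          · simp [pvLoopA, pvLoopB, hq, h1]
          · simp only [pvLoopA, pvLoopB, Bool.false_eq_true, if_false, hq, h1]
            split_ifs <;> exact ihr.1 _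
      · intro q d
        by_cases hb : ch = '\\'
        · subst hb
          cases rest with
          | nil => simp [pvLoopA, pvLoopB, pvSkipStr_bs_nil]
          | cons x rest' =>
            have hx := ih rest'.length (by simp only [List.length_cons]; omega) rest' rfl
            rw [pvSkipStr_bs]
            simp [pvLoopA, hx.2 q d]
        · by_cases hcq : ch = q
          · subst hcq
            rw [pvSkipStr_close ch rest hb]
            simp [pvLoopA, hb, ihr.1 d]
          · rw [pvSkipStr_other q ch rest hb hcq]
            simp [pvLoopA, hb, hcq, ihr.2 q d]

-- ===== VERDICT (by name: the statement is the Claim_ definition above) =====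
theorem paren_balance_py_spec : Claim_equal_paren_balance_py := by
  intro line _
  unfold Spec_paren_balance_py paren_balance_py paren_balance_py_alt
  exact (pvLoop_eq line.toList.length line.toList rfl).1 0
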